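-- pv_equiv track=rewrite | github.com/AKASH-tech234/Arrakis-Labs | ai-services/scripts/validate_production.py | _is_partial_match
-- ===== SOURCE A (Python) =====
-- VERDICT_TO_CAUSES = {
--     "wrong_answer": [
--         "off_by_one_error",
--         "boundary_condition_blindness",
--         "algorithm_misfit",
--         "greedy_greed",
--         "dp_state_confusion",
--     ],
--     "runtime_error": [
--         "null_pointer_neglect",
--         "boundary_condition_blindness",
--         "recursion_confusion",
--         "integer_overflow",
--     ],
--     "time_limit_exceeded": [
--         "time_complexity_underestimation",
--         "recursion_confusion",
--         "data_structure_misuse",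
--     ],
--     "memory_limit_exceeded": [
--         "space_complexity_bloat",
--         "recursion_confusion",
--         "data_structure_misuse",
--     ],
--     "compile_error": [
--         "syntax_slip",
--     ],
-- }
--
-- def _is_partial_match(
--
--     predicted: str,
--     actual: str,
--     verdict: str,
-- ) -> bool:
--     """Check if prediction is a partial/related match."""
--     if predicted == actual:
--         return True
--
--     # Related causes
--     related_groups = [
--         {"off_by_one_error", "boundary_condition_blindness"},
--         {"recursion_confusion", "base_case_blindness"},
--         {"time_complexity_underestimation", "data_structure_misuse"},
--         {"greedy_greed", "algorithm_misfit", "dp_state_confusion"},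
--     ]
--
--     for group in related_groups:
--         if predicted in group and actual in group:
--             return True
--
--     # Check if prediction matches verdict heuristics
--     verdict_causes = VERDICT_TO_CAUSES.get(verdict, [])
--     if predicted in verdict_causes and actual in verdict_causes:
--         return True
--
--     return False
-- ===== SOURCE B (Python) =====
-- VERDICT_TO_CAUSES = {
--     "wrong_answer": [
--         "off_by_one_error",
--         "boundary_condition_blindness",
--         "algorithm_misfit",
--         "greedy_greed",
--         "dp_state_confusion",
--     ],
--     "runtime_error": [
--         "null_pointer_neglect",
--         "boundary_condition_blindness",
--         "recursion_confusion",
--         "integer_overflow",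
--     ],
--     "time_limit_exceeded": [
--         "time_complexity_underestimation",
--         "recursion_confusion",
--         "data_structure_misuse",
--     ],
--     "memory_limit_exceeded": [
--         "space_complexity_bloat",
--         "recursion_confusion",
--         "data_structure_misuse",
--     ],
--     "compile_error": [
--         "syntax_slip",
--     ],
-- }
--
--
-- def _is_partial_match(predicted: str, actual: str, verdict: str) -> bool:
--     """Index-first variant: build cause -> group-id index, then intersect."""
--     if predicted == actual:
--         return True
--
--     groups = [
--         {"off_by_one_error", "boundary_condition_blindness"},
--         {"recursion_confusion", "base_case_blindness"},
--         {"time_complexity_underestimation", "data_structure_misuse"},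
--         {"greedy_greed", "algorithm_misfit", "dp_state_confusion"},
--         set(VERDICT_TO_CAUSES.get(verdict, [])),
--     ]
--
--     index = {}
--     for gid, group in enumerate(groups):
--         for cause in group:
--             index.setdefault(cause, set()).add(gid)
--
--     return not index.get(predicted, set()).isdisjoint(index.get(actual, set()))
-- ===== Notes on version B (the rewrite author's own statement) =====
-- stated objective: alternative
-- what changed: B keeps the predicted==actual early return, then builds a cause->group-id index over the four related groups plus the verdict's cause list as a fifth group, and returns True iff the group-id sets of predicted and actual intersect, replacing A's per-group both-membership scan and separate verdict branch.
import Mathlib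
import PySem

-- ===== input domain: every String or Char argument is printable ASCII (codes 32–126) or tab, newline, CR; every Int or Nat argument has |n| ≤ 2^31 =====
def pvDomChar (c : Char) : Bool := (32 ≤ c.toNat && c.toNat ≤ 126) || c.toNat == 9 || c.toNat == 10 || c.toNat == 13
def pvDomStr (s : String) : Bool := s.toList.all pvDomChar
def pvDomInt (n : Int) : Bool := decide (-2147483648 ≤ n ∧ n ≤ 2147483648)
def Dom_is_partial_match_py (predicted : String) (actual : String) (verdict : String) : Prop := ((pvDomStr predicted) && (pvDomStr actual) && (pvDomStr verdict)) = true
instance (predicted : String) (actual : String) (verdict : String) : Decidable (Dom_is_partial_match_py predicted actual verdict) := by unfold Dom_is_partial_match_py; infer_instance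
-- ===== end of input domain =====

-- B replaces A's per-group scan + separate verdict check by one cause→group-id index
-- (the verdict causes folded in as a fifth group) and an intersection test (objective: alternative).

-- ===== PORT A =====
def pvVerdictToCauses : PySem.Dict String (List String) :=
  PySem.Dict.ofList
    [("wrong_answer",
       ["off_by_one_error", "boundary_condition_blindness", "algorithm_misfit",
        "greedy_greed", "dp_state_confusion"]),
     ("runtime_error",
       ["null_pointer_neglect", "boundary_condition_blindness", "recursion_confusion",
        "integer_overflow"]),
     ("time_limit_exceeded",
       ["time_complexity_underestimation", "recursion_confusion", "data_structure_misuse"]),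
     ("memory_limit_exceeded",
       ["space_complexity_bloat", "recursion_confusion", "data_structure_misuse"]),
     ("compile_error",
       ["syntax_slip"])]

def is_partial_match_py (predicted : String) (actual : String) (verdict : String) : Bool :=
  if predicted == actual then true
  else
    let related_groups : List (PySem.Set String) :=
      [PySem.Set.ofList ["off_by_one_error", "boundary_condition_blindness"],
       PySem.Set.ofList ["recursion_confusion", "base_case_blindness"],
       PySem.Set.ofList ["time_complexity_underestimation", "data_structure_misuse"],
       PySem.Set.ofList ["greedy_greed", "algorithm_misfit", "dp_state_confusion"]]
    -- 'for group in related_groups: if … return True' = first hit wins = any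
    if related_groups.any (fun g => PySem.Set.contains g predicted && PySem.Set.contains g actual) then true
    else
      let verdict_causes := pvVerdictToCauses.getD verdict []
      if verdict_causes.contains predicted && verdict_causes.contains actual then true
      else false

-- ===== PORT B =====
def pvGroups (verdict : String) : List (PySem.Set String) :=
  [PySem.Set.ofList ["off_by_one_error", "boundary_condition_blindness"],
   PySem.Set.ofList ["recursion_confusion", "base_case_blindness"],
   PySem.Set.ofList ["time_complexity_underestimation", "data_structure_misuse"],
   PySem.Set.ofList ["greedy_greed", "algorithm_misfit", "dp_state_confusion"],
   PySem.Set.ofList (pvVerdictToCauses.getD verdict [])]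

-- index = {}; for gid, group in enumerate(groups): for cause in group: index.setdefault(cause, set()).add(gid)
def pvIndex (groups : List (PySem.Set String)) : PySem.Dict String (PySem.Set Int) :=
  (PySem.List.enumerate groups).foldl
    (fun d p => p.2.foldl
      (fun d c => d.modify c PySem.Set.empty (fun s => PySem.Set.add s p.1)) d)
    PySem.Dict.empty

def is_partial_match_py_alt (predicted : String) (actual : String) (verdict : String) : Bool :=
  if predicted == actual then true
  else
    let idx := pvIndex (pvGroups verdict)
    !(PySem.Set.isdisjoint (idx.getD predicted PySem.Set.empty)
                           (idx.getD actual PySem.Set.empty))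

-- ===== PRECONDITION & SPEC =====
def Spec_is_partial_match_py (predicted : String) (actual : String) (verdict : String) (out : Bool) : Prop := out = is_partial_match_py_alt predicted actual verdict
instance (predicted : String) (actual : String) (verdict : String) (out : Bool) : Decidable (Spec_is_partial_match_py predicted actual verdict out) := by unfold Spec_is_partial_match_py; infer_instance

-- ===== CLAIM (what is proved, stated in full; the proofs are below) =====
def Claim_equal_is_partial_match_py : Prop := ∀ (predicted : String) (actual : String) (verdict : String), Dom_is_partial_match_py predicted actual verdict → Spec_is_partial_match_py predicted actual verdict (is_partial_match_py predicted actual verdict)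

-- ===== LEMMAS AND PROOFS =====

-- the inner loop: adding one group id j for every cause of group g
theorem pv_mem_inner (g : List String) (j : Int) :
    ∀ (d : PySem.Dict String (PySem.Set Int)) (c : String) (i : Int),
      (i ∈ (g.foldl (fun d c => d.modify c PySem.Set.empty (fun s => PySem.Set.add s j)) d).getD c PySem.Set.empty
        ↔ i ∈ d.getD c PySem.Set.empty ∨ (c ∈ g ∧ i = j)) := by
  induction g with
  | nil => simp
  | cons c0 g ih =>
    intro d c i
    simp only [List.foldl_cons, ih]
    rw [PySem.Dict.getD_modify]
    by_cases hc : c = c0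
    · subst hc
      simp [PySem.Set.mem_add]
      tauto
    · simp [hc]

-- the outer loop over the enumerated groups
theorem pv_mem_outer (l : List (Int × PySem.Set String)) :
    ∀ (d : PySem.Dict String (PySem.Set Int)) (c : String) (i : Int),
      (i ∈ (l.foldl
          (fun d p => p.2.foldl
            (fun d c => d.modify c PySem.Set.empty (fun s => PySem.Set.add s p.1)) d) d).getD c PySem.Set.empty
        ↔ i ∈ d.getD c PySem.Set.empty ∨ ∃ p ∈ l, c ∈ p.2 ∧ i = p.1) := by
  induction l with
  | nil => simp
  | cons p l ih =>
    intro d c i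
    simp only [List.foldl_cons, ih, pv_mem_inner]
    simp
    tauto

theorem pv_mem_index (groups : List (PySem.Set String)) (c : String) (i : Int) :
    i ∈ (pvIndex groups).getD c PySem.Set.empty
      ↔ ∃ p ∈ PySem.List.enumerate groups, c ∈ p.2 ∧ i = p.1 := by
  unfold pvIndex
  rw [pv_mem_outer]
  simp [PySem.Dict.getD_empty, PySem.Set.empty]

-- the intersection test = "some group contains both causes"
theorem pv_not_disjoint (groups : List (PySem.Set String)) (x y : String) :
    (!(PySem.Set.isdisjoint ((pvIndex groups).getD x PySem.Set.empty)
        ((pvIndex groups).getD y PySem.Set.empty))) = true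
      ↔ ∃ g ∈ groups, x ∈ g ∧ y ∈ g := by
  rw [Bool.not_eq_true', Bool.eq_false_iff, Ne, PySem.Set.isdisjoint_iff]
  push Not
  constructor
  · rintro ⟨i, hix, hiy⟩
    rw [pv_mem_index] at hix hiy
    obtain ⟨p, hp, hxp, hip⟩ := hix
    obtain ⟨q, hq, hyq, hiq⟩ := hiy
    rw [PySem.List.mem_enumerate_iff] at hp hq
    obtain ⟨k, hk, rfl⟩ := hp
    obtain ⟨k', hk', rfl⟩ := hq
    simp only at hip hiq hxp hyq
    have hkk : k = k' := by omega
    subst hkk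
    exact ⟨groups[k], List.getElem_mem hk, hxp, hyq⟩
  · rintro ⟨g, hg, hx, hy⟩
    obtain ⟨k, hk, rfl⟩ := List.getElem_of_mem hg
    refine ⟨(k : Int), ?_, ?_⟩
    · rw [pv_mem_index]
      refine ⟨((k : Int), groups[k]), ?_, hx, rfl⟩
      rw [PySem.List.mem_enumerate_iff]
      exact ⟨k, hk, by simp⟩
    · rw [pv_mem_index]
      refine ⟨((k : Int), groups[k]), ?_, hy, rfl⟩
      rw [PySem.List.mem_enumerate_iff]
      exact ⟨k, hk, by simp⟩

-- ===== VERDICT (by name: the statement is the Claim_ definition above) =====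
theorem is_partial_match_py_spec : Claim_equal_is_partial_match_py := by
  intro predicted actual verdict _
  unfold Spec_is_partial_match_py is_partial_match_py is_partial_match_py_alt
  by_cases h : predicted = actual
  · simp [h]
  · simp only [beq_iff_eq, if_neg h]
    rw [Bool.eq_iff_iff, pv_not_disjoint]
    simp only [pvGroups, List.mem_cons, List.not_mem_nil, or_false]
    constructor
    · intro hA
      split_ifs at hA with h1 h2
      · rw [List.any_eq_true] at h1
        obtain ⟨g, hg, hpg⟩ := h1
        rw [Bool.and_eq_true, PySem.Set.contains_iff, PySem.Set.contains_iff] at hpg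
        refine ⟨g, ?_, hpg.1, hpg.2⟩
        simp only [List.mem_cons, List.not_mem_nil, or_false] at hg
        tauto
      · rw [Bool.and_eq_true] at h2
        refine ⟨PySem.Set.ofList (pvVerdictToCauses.getD verdict []), by tauto, ?_, ?_⟩
        · rw [PySem.Set.mem_ofList]
          simpa using h2.1
        · rw [PySem.Set.mem_ofList]
          simpa using h2.2
    · rintro ⟨g, hg, hx, hy⟩
      split_ifs with h1 h2
      · rfl
      · rfl
      · exfalso
        rcases hg with rfl | rfl | rfl | rfl | rfl
        · exact h1 (List.any_eq_true.mpr ⟨PySem.Set.ofList ["off_by_one_error", "boundary_condition_blindness"], by simp,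
            by rw [Bool.and_eq_true, PySem.Set.contains_iff, PySem.Set.contains_iff]; exact ⟨hx, hy⟩⟩)
        · exact h1 (List.any_eq_true.mpr ⟨PySem.Set.ofList ["recursion_confusion", "base_case_blindness"], by simp,
            by rw [Bool.and_eq_true, PySem.Set.contains_iff, PySem.Set.contains_iff]; exact ⟨hx, hy⟩⟩)
        · exact h1 (List.any_eq_true.mpr ⟨PySem.Set.ofList ["time_complexity_underestimation", "data_structure_misuse"], by simp,
            by rw [Bool.and_eq_true, PySem.Set.contains_iff, PySem.Set.contains_iff]; exact ⟨hx, hy⟩⟩)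
        · exact h1 (List.any_eq_true.mpr ⟨PySem.Set.ofList ["greedy_greed", "algorithm_misfit", "dp_state_confusion"], by simp,
            by rw [Bool.and_eq_true, PySem.Set.contains_iff, PySem.Set.contains_iff]; exact ⟨hx, hy⟩⟩)
        · rw [PySem.Set.mem_ofList] at hx hy
          exact h2 (by simp [hx, hy])
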